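-- pv_equiv track=rewrite | github.com/madeibao/CTest | Huawei/真正的密码.py | result
-- ===== SOURCE A (Python) =====
-- def result(arr):
--     setArr = set(arr)
--     # 先按照长度排序，然后按照字典序排序
--     arr.sort(key=lambda s: (len(s), [ord(c) for c in s]))
--     # 倒序遍历嘛。现在已经按照长度升序排列。那么倒数第一个肯定是最长的，字典序最大的。
--     for i in range(len(arr)-1, -1, -1):
--         s = arr[i] # 取一个。
--         flag = True # 先默认他可以。然后碰到返例就否定。
--         # 截取当前字符串的字串。
--         for j in range(len(s)-1, 0, -1):
--             # s[:j]是取不到j的，也就是取不到len(s)-1，也就是从len(s)-2开始。len(s)-1不用判断啊。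
--             if s[:j] not in setArr:
--                 flag = False
--                 break
--         # 遍历了一圈了
--         if flag:
--             return s
--     return ""
-- ===== SOURCE B (Python) =====
-- def result(arr):
--     # One pass over the words sorted by length: a word is "valid" iff all its
--     # proper non-empty prefixes are in the input; valid(w) reduces to one
--     # membership test of w[:-1] in the already-computed valid set.
--     valid = set()
--     best = ""
--     for w in sorted(arr, key=len):
--         if len(w) <= 1 or w[:-1] in valid:
--             valid.add(w)
--             if (len(w), w) > (len(best), best):
--                 best = w
--     return best
-- ===== Notes on version B (the rewrite author's own statement) =====
-- stated objective: faster
-- what changed: Replaces A's full (len, ord-list) sort plus a quadratic all-prefixes set-check per word with one length-sorted pass that memoises validity in a 'valid' set (a single w[:-1] membership test per word) while tracking the running (len, lexicographic) maximum.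
import Mathlib
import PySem

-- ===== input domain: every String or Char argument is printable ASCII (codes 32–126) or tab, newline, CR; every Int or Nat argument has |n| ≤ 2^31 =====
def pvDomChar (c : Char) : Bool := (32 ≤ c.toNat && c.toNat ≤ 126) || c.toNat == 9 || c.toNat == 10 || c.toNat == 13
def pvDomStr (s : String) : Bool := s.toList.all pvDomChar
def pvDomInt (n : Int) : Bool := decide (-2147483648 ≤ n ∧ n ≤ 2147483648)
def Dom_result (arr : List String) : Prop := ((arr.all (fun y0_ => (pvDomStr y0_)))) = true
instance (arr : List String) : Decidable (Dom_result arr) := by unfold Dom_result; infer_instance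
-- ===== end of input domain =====

-- B replaces A's (len, ord-list) sort plus per-word all-prefixes re-check by one length-sorted pass with a
-- memoised 'valid' set (a single w[:-1] membership test per word) and a running maximum; A also sorts its
-- argument in place (B does not) — the equivalence proved here is about the return value only.

-- ===== PORT A =====
-- flag computation: 'for j in range(len(s)-1, 0, -1): if s[:j] not in setArr: flag=False; break'
-- (the break only stops early; once false the fold stays false, so the no-break fold is exact)
def resultFlag (setArr : PySem.Set String) (s : String) : Bool :=
  (PySem.List.pyRange (PySem.Str.len s - 1) 0 (-1)).foldl
    (fun flag j =>
      if !(PySem.Set.contains setArr (PySem.Str.slice s none (some j))) then false else flag)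
    true

-- 'for i in range(len(arr)-1, -1, -1): s = arr[i]; … if flag: return s' / fall through to ""
-- (every index produced by the range is in bounds, so the pyGetD default "" is never used)
def resultLoop (sortedArr : List String) (setArr : PySem.Set String) : List Int → String
  | [] => ""
  | i :: rest =>
    let s := PySem.List.pyGetD sortedArr i ""
    if resultFlag setArr s then s else resultLoop sortedArr setArr rest

def result (arr : List String) : String :=
  let setArr := PySem.Set.ofList arr
  let sortedArr := PySem.List.sorted2 arr (fun s => PySem.Str.len s)
    (fun s => s.toList.map (fun c => (c.toNat : Int)))
  resultLoop sortedArr setArr (PySem.List.pyRange ((sortedArr.length : Int) - 1) (-1) (-1))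

-- ===== PORT B =====
-- [ord(c) for c in s]; Python's string '>' compares code points, ported on these lists (exact)
def ordKey (s : String) : List Int := s.toList.map (fun c => (c.toNat : Int))

-- Python tuple compare '(len(w), w) > (len(b), b)'
def tupleGt (w b : String) : Bool :=
  decide (PySem.Str.len b < PySem.Str.len w) ||
  (decide (PySem.Str.len w = PySem.Str.len b) && decide (ordKey b < ordKey w))

-- loop body: 'if len(w) <= 1 or w[:-1] in valid: valid.add(w); if (len(w), w) > (len(best), best): best = w'
def resultStep (st : PySem.Set String × String) (w : String) : PySem.Set String × String :=
  if PySem.Str.len w ≤ 1 || PySem.Set.contains st.1 (PySem.Str.slice w none (some (-1))) then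
    (PySem.Set.add st.1 w, if tupleGt w st.2 then w else st.2)
  else st

def result_alt (arr : List String) : String :=
  ((PySem.List.sorted arr (fun w => PySem.Str.len w)).foldl resultStep (PySem.Set.empty, "")).2

-- ===== PRECONDITION & SPEC =====
def Spec_result (arr : List String) (out : String) : Prop := out = result_alt arr
instance (arr : List String) (out : String) : Decidable (Spec_result arr out) := by
  unfold Spec_result; infer_instance

-- ===== CLAIM =====
def Claim_equal_result : Prop := ∀ (arr : List String), Dom_result arr → Spec_result arr (result arr)

-- ===== LEMMAS AND PROOFS =====

-- the sort key both programs select by: (length, code-point list), ordered lexicographically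
def K (s : String) : Lex (Int × List Int) := toLex (PySem.Str.len s, ordKey s)

def kmax (b w : String) : String := if K b < K w then w else b

def maxK (l : List String) : String := l.foldl kmax ""

-- 'all proper non-empty prefixes of s are in arr'
def good (arr : List String) (s : String) : Prop :=
  ∀ j : Nat, 1 ≤ j → j < s.toList.length → String.ofList (s.toList.take j) ∈ arr

def goodB (arr : List String) (s : String) : Bool :=
  (List.range s.toList.length).all
    (fun j => decide (j = 0) || decide (String.ofList (s.toList.take j) ∈ arr))

lemma goodB_iff (arr : List String) (s : String) : goodB arr s = true ↔ good arr s := by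
  unfold goodB good
  simp only [List.all_eq_true, List.mem_range, Bool.or_eq_true, decide_eq_true_eq]
  constructor
  · intro h j h1 h2
    rcases h j h2 with h0 | h0
    · omega
    · exact h0
  · intro h j hj
    by_cases h0 : j = 0
    · exact Or.inl h0
    · exact Or.inr (h j (by omega) hj)

lemma K_inj : Function.Injective K := by
  intro a b h
  unfold K at h
  have h2 := congrArg (fun p => (ofLex p).2) h
  simp only [ofLex_toLex] at h2
  unfold ordKey at h2
  have hinj : Function.Injective (fun c : Char => (c.toNat : Int)) := by
    intro c d hcd
    simp only [Int.natCast_inj] at hcd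
    apply Char.ext
    unfold Char.toNat at hcd
    exact UInt32.toNat_inj.mp hcd
  have h3 : a.toList = b.toList := List.map_injective_iff.mpr hinj h2
  calc a = String.ofList a.toList := (String.ofList_toList).symm
    _ = String.ofList b.toList := by rw [h3]
    _ = b := String.ofList_toList

lemma K_kmax (b w : String) : K (kmax b w) = max (K b) (K w) := by
  unfold kmax
  split_ifs with h
  · exact (max_eq_right (le_of_lt h)).symm
  · exact (max_eq_left (not_lt.mp h)).symm

lemma kmax_rcomm : ∀ (b x y : String), kmax (kmax b x) y = kmax (kmax b y) x := by
  intro b x y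
  apply K_inj
  rw [K_kmax, K_kmax, K_kmax, K_kmax]
  exact max_right_comm _ _ _

lemma maxK_perm {l₁ l₂ : List String} (h : l₁.Perm l₂) : maxK l₁ = maxK l₂ := by
  unfold maxK
  haveI : RightCommutative kmax := ⟨kmax_rcomm⟩
  exact h.foldl_eq ""

lemma foldl_kmax_mem (l : List String) (b : String) :
    l.foldl kmax b = b ∨ l.foldl kmax b ∈ l := by
  induction l generalizing b with
  | nil => exact Or.inl rfl
  | cons x t ih =>
    simp only [List.foldl_cons]
    rcases ih (kmax b x) with h | h
    · rw [h]
      unfold kmax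
      split_ifs
      · exact Or.inr (List.mem_cons_self)
      · exact Or.inl rfl
    · exact Or.inr (List.mem_cons_of_mem _ h)

lemma K_empty_le (s : String) : K "" ≤ K s := by
  unfold K ordKey
  have h : PySem.Str.len "" = 0 := by decide
  rw [h]
  rcases lt_or_eq_of_le (show (0:Int) ≤ PySem.Str.len s by
    rw [PySem.Str.len_eq]; exact Int.natCast_nonneg _) with hlt | heq
  · exact le_of_lt (Prod.Lex.toLex_lt_toLex.mpr (Or.inl hlt))
  · have hs : s.toList = [] := by
      rw [PySem.Str.len_eq] at heq
      have : s.toList.length = 0 := by omega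
      exact List.length_eq_zero_iff.mp this
    apply le_of_eq
    have h0 : ("" : String).toList = [] := by decide
    rw [← heq]
    simp [h0, hs]

-- maxK over a snoc
lemma maxK_append_single (l : List String) (a : String) :
    maxK (l ++ [a]) = kmax (maxK l) a := by
  unfold maxK
  rw [List.foldl_append]
  rfl

-- A's inner loop computes goodB
lemma flag_eq_goodB (arr : List String) (s : String) :
    resultFlag (PySem.Set.ofList arr) s = goodB arr s := by
  have hlen := PySem.Str.len_eq s
  unfold resultFlag
  rw [PySem.List.foldl_if_false_eq, Bool.true_and, Bool.eq_iff_iff]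
  unfold goodB
  simp only [Bool.not_eq_true', List.any_eq_false, Bool.not_eq_false, List.all_eq_true,
    List.mem_range, Bool.or_eq_true, decide_eq_true_eq,
    PySem.List.mem_pyRange_iff_of_neg (show (-1:Int) < 0 by decide)]
  constructor
  · intro h j hj
    by_cases h0 : j = 0
    · exact Or.inl h0
    · right
      have hjl : (j : Int) ∈ Set.Ioc 0 (PySem.Str.len s - 1) := by
        constructor <;> omega
      have := h (j : Int) ⟨hjl.1, hjl.2, ⟨-(j : Int) + (PySem.Str.len s - 1), by ring⟩⟩
      rw [PySem.Str.slice] at this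
      rw [PySem.Chars.slice_eq_listSlice, PySem.List.slice_to_natCast] at this
      rw [PySem.Set.contains, List.contains_iff_mem, PySem.Set.mem_ofList] at this
      exact this
  · intro h j hj
    obtain ⟨h1, h2, _⟩ := hj
    rw [show j = ((j.toNat : Nat) : Int) by omega]
    rw [PySem.Str.slice, PySem.Chars.slice_eq_listSlice, PySem.List.slice_to_natCast,
      PySem.Set.contains, List.contains_iff_mem, PySem.Set.mem_ofList]
    rcases h j.toNat (by omega) with h0 | h0
    · omega
    · exact h0

-- A's outer loop over the reversed index range is find?-from-the-right
lemma loop_congr (xs ys : List String) (S : PySem.Set String) (idxs : List Int)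
    (h : ∀ i ∈ idxs, PySem.List.pyGetD xs i "" = PySem.List.pyGetD ys i "") :
    resultLoop xs S idxs = resultLoop ys S idxs := by
  induction idxs with
  | nil => rfl
  | cons i rest ih =>
    simp only [resultLoop]
    rw [h i (List.mem_cons_self), ih (fun j hj => h j (List.mem_cons_of_mem _ hj))]

lemma loop_eq_findRev (S : PySem.Set String) (sa : List String) :
    resultLoop sa S (((List.range sa.length).map (fun k : Nat => (k : Int))).reverse)
      = ((sa.reverse.find? (resultFlag S)).getD "") := by
  induction sa using List.reverseRecOn with
  | nil => rfl
  | append_singleton l a ih =>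
    rw [List.length_append, List.length_singleton, List.range_succ, List.map_append,
      List.reverse_append]
    simp only [List.map_cons, List.map_nil, List.reverse_cons, List.reverse_nil,
      List.nil_append, List.cons_append]
    rw [List.reverse_append]
    simp only [List.reverse_cons, List.reverse_nil, List.nil_append, List.singleton_append]
    simp only [resultLoop]
    have hget : PySem.List.pyGetD (l ++ [a]) ((l.length : Nat) : Int) "" = a := by
      rw [PySem.List.pyGetD_natCast, List.getD_eq_getElem?_getD, List.getElem?_concat_length]
      rfl
    rw [hget]
    by_cases hf : resultFlag S a = true
    · rw [List.find?_cons_of_pos hf]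
      simp [hf]
    · rw [List.find?_cons_of_neg (by simp [hf])]
      simp only [Bool.not_eq_true] at hf
      rw [hf]
      simp only [Bool.false_eq_true, if_false]
      rw [← ih]
      apply loop_congr
      intro i hi
      simp only [List.mem_reverse, List.mem_map, List.mem_range] at hi
      obtain ⟨k, hk, rfl⟩ := hi
      rw [PySem.List.pyGetD_natCast, PySem.List.pyGetD_natCast,
        List.getD_eq_getElem?_getD, List.getD_eq_getElem?_getD,
        List.getElem?_append_left hk]

-- in a K-ascending list the last element satisfying p is the K-max of the satisfiers
lemma findRev_eq_maxK (p : String → Bool) (l : List String)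
    (hp : l.Pairwise (fun a b => K a ≤ K b)) :
    ((l.reverse.find? p).getD "") = maxK (l.filter p) := by
  induction l using List.reverseRecOn with
  | nil => rfl
  | append_singleton l a ih =>
    rw [List.pairwise_append] at hp
    obtain ⟨hl, -, hla⟩ := hp
    rw [List.reverse_append]
    simp only [List.reverse_cons, List.reverse_nil, List.nil_append, List.singleton_append]
    rw [List.filter_append]
    by_cases hf : p a = true
    · rw [List.find?_cons_of_pos hf]
      have : List.filter p [a] = [a] := by simp [hf]
      rw [this, maxK_append_single]
      have hle : K (maxK (l.filter p)) ≤ K a := by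
        rcases foldl_kmax_mem (l.filter p) "" with h | h
        · rw [maxK, h]; exact K_empty_le a
        · exact hla _ (List.mem_of_mem_filter h) a (List.mem_singleton_self a)
      unfold kmax
      split_ifs with h
      · rfl
      · have : K (maxK (l.filter p)) = K a := le_antisymm hle (not_lt.mp h)
        exact (K_inj this).symm ▸ rfl
    · rw [List.find?_cons_of_neg (by simp [hf])]
      have : List.filter p [a] = [] := by simp [hf]
      rw [this, List.append_nil]
      exact ih hl

-- B's fold invariant
lemma good_of_short (arr : List String) (s : String) (h : s.toList.length ≤ 1) :
    good arr s := by
  intro j h1 h2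
  omega

lemma good_iff_dropLast (arr : List String) (s : String) (h : 2 ≤ s.toList.length) :
    good arr s ↔
      (String.ofList s.toList.dropLast ∈ arr ∧ good arr (String.ofList s.toList.dropLast)) := by
  have hdl : (String.ofList s.toList.dropLast).toList = s.toList.dropLast := String.toList_ofList
  have hlen : s.toList.dropLast.length = s.toList.length - 1 := List.length_dropLast
  constructor
  · intro hg
    refine ⟨?_, ?_⟩
    · have := hg (s.toList.length - 1) (by omega) (by omega)
      rwa [← List.dropLast_eq_take] at this
    · intro j h1 h2
      rw [hdl, hlen] at h2
      rw [hdl, List.dropLast_eq_take, List.take_take, min_eq_left (by omega)]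
      exact hg j h1 (by omega)
  · rintro ⟨h1, h2⟩ j hj1 hj2
    by_cases hj : j = s.toList.length - 1
    · subst hj
      rw [← List.dropLast_eq_take]
      exact h1
    · have := h2 j hj1 (by rw [hdl, hlen]; omega)
      rwa [hdl, List.dropLast_eq_take, List.take_take, min_eq_left (by omega)] at this

lemma tupleGt_eq (w b : String) : tupleGt w b = decide (K b < K w) := by
  rw [Bool.eq_iff_iff]
  unfold tupleGt K
  simp only [Bool.or_eq_true, Bool.and_eq_true, decide_eq_true_eq, Prod.Lex.toLex_lt_toLex]
  constructor
  · rintro (h | ⟨h1, h2⟩)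
    · exact Or.inl h
    · exact Or.inr ⟨h1.symm, h2⟩
  · rintro (h | ⟨h1, h2⟩)
    · exact Or.inl h
    · exact Or.inr ⟨h1.symm, h2⟩

lemma ofList_snoc (xs : List String) (x : String) :
    PySem.Set.ofList (xs ++ [x]) = PySem.Set.add (PySem.Set.ofList xs) x := by
  rw [PySem.Set.ofList_eq_foldl, PySem.Set.ofList_eq_foldl, List.foldl_append]
  rfl

lemma foldB (arr : List String) (suf : List String) :
    ∀ (pre : List String),
      (pre ++ suf).Pairwise (fun a b => PySem.Str.len a ≤ PySem.Str.len b) →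
      (∀ x, x ∈ pre ++ suf → x ∈ arr) → (∀ x, x ∈ arr → x ∈ pre ++ suf) →
      suf.foldl resultStep
          (PySem.Set.ofList (pre.filter (goodB arr)), maxK (pre.filter (goodB arr)))
        = (PySem.Set.ofList ((pre ++ suf).filter (goodB arr)),
            maxK ((pre ++ suf).filter (goodB arr))) := by
  induction suf with
  | nil =>
    intro pre _ _ _
    rw [List.append_nil, List.foldl_nil]
  | cons w suf' ih =>
    intro pre hp h1 h2
    rw [List.foldl_cons]
    have hpcons : pre ++ w :: suf' = (pre ++ [w]) ++ suf' := by simp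
    have hlenw := PySem.Str.len_eq w
    have hkey :
        resultStep (PySem.Set.ofList (pre.filter (goodB arr)), maxK (pre.filter (goodB arr))) w
          = (PySem.Set.ofList ((pre ++ [w]).filter (goodB arr)),
              maxK ((pre ++ [w]).filter (goodB arr))) := by
      by_cases hg : good arr w
      · -- condition true, w appended to the filtered list
        have hgB : goodB arr w = true := (goodB_iff arr w).mpr hg
        have hcond : (decide (PySem.Str.len w ≤ 1)
            || PySem.Set.contains (PySem.Set.ofList (pre.filter (goodB arr)))
                 (PySem.Str.slice w none (some (-1)))) = true := by
          by_cases hshort : w.toList.length ≤ 1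
          · apply Bool.or_eq_true_iff.mpr
            left
            exact decide_eq_true (by rw [hlenw]; omega)
          · apply Bool.or_eq_true_iff.mpr
            right
            have hslice : PySem.Str.slice w none (some (-1))
                = String.ofList w.toList.dropLast := by
              rw [PySem.Str.slice, PySem.Chars.slice_eq_listSlice, PySem.List.slice_to_neg_one]
            rw [hslice, PySem.Set.contains, List.contains_iff_mem, PySem.Set.mem_ofList]
            have hgd := (good_iff_dropLast arr w (by omega)).mp hg
            have hdpre : String.ofList w.toList.dropLast ∈ pre := by
              rcases List.mem_append.mp (h2 _ hgd.1) with hm | hm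
              · exact hm
              · exfalso
                have hdlen : (String.ofList w.toList.dropLast).toList.length
                    = w.toList.length - 1 := by
                  rw [String.toList_ofList, List.length_dropLast]
                rcases List.mem_cons.mp hm with heq | hm'
                · have := congrArg (fun t => t.toList.length) heq
                  simp only [String.toList_ofList, List.length_dropLast] at this
                  omega
                · have := (List.pairwise_append.mp hp).2.1
                  have hrel := (List.pairwise_cons.mp this).1 _ hm'
                  rw [PySem.Str.len_eq, PySem.Str.len_eq] at hrel
                  omega
            exact List.mem_filter.mpr
              ⟨hdpre, (goodB_iff arr _).mpr hgd.2⟩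
        rw [resultStep, if_pos hcond]
        rw [List.filter_append, List.filter_cons, hgB]
        rw [if_pos rfl]
        simp only [List.filter_nil]
        rw [ofList_snoc, maxK_append_single]
        have hbest : (if tupleGt w (maxK (pre.filter (goodB arr))) then w
            else maxK (pre.filter (goodB arr)))
              = kmax (maxK (pre.filter (goodB arr))) w := by
          rw [tupleGt_eq, kmax]
          simp only [decide_eq_true_eq]
        rw [hbest]
      · -- condition false, state unchanged
        have hgB : goodB arr w = false := by
          rw [← Bool.not_eq_true, goodB_iff]
          exact hg
        have hcond : (decide (PySem.Str.len w ≤ 1)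
            || PySem.Set.contains (PySem.Set.ofList (pre.filter (goodB arr)))
                 (PySem.Str.slice w none (some (-1)))) = false := by
          have hshort : ¬ (w.toList.length ≤ 1) := fun hs => hg (good_of_short arr w hs)
          apply Bool.or_eq_false_iff.mpr
          refine ⟨decide_eq_false (by rw [hlenw]; omega), ?_⟩
          have hslice : PySem.Str.slice w none (some (-1))
              = String.ofList w.toList.dropLast := by
            rw [PySem.Str.slice, PySem.Chars.slice_eq_listSlice, PySem.List.slice_to_neg_one]
          rw [hslice, PySem.Set.contains, ← Bool.not_eq_true, List.contains_iff_mem,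
            PySem.Set.mem_ofList]
          intro hmem
          obtain ⟨hdpre, hdgB⟩ := List.mem_filter.mp hmem
          apply hg
          rw [good_iff_dropLast arr w (by omega)]
          exact ⟨h1 _ (List.mem_append.mpr (Or.inl hdpre)), (goodB_iff arr _).mp hdgB⟩
        rw [resultStep, if_neg (by rw [hcond]; exact Bool.false_ne_true)]
        rw [List.filter_append, List.filter_cons, hgB]
        rw [if_neg Bool.false_ne_true]
        simp only [List.filter_nil, List.append_nil]
    rw [hkey, hpcons]
    exact ih (pre ++ [w]) (by rwa [← hpcons])
      (fun x hx => h1 x (by rw [← hpcons] at hx; exact hx))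
      (fun x hx => by rw [← hpcons]; exact h2 x hx)

-- A's sort with the tuple key (len, ord-list) is the sort by K
lemma sorted2_eq_sortedK (arr : List String) :
    PySem.List.sorted2 arr (fun s => PySem.Str.len s)
        (fun s => s.toList.map (fun c => (c.toNat : Int)))
      = PySem.List.sorted arr K := by
  rw [PySem.List.sorted2, PySem.List.sorted]
  simp only [if_neg (Bool.false_ne_true)]
  have hbefore : (fun a b => decide (PySem.Str.len a < PySem.Str.len b)
      || (!decide (PySem.Str.len b < PySem.Str.len a)
          && decide (a.toList.map (fun c => (c.toNat : Int))
              < b.toList.map (fun c => (c.toNat : Int)))))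
      = fun a b => decide (K a < K b) := by
    funext a b
    rw [Bool.eq_iff_iff]
    unfold K ordKey
    simp only [Bool.or_eq_true, Bool.and_eq_true, Bool.not_eq_true', decide_eq_true_eq,
      decide_eq_false_iff_not, Prod.Lex.toLex_lt_toLex]
    constructor
    · rintro (h | ⟨h1, h2⟩)
      · exact Or.inl h
      · by_cases h3 : PySem.Str.len a < PySem.Str.len b
        · exact Or.inl h3
        · exact Or.inr ⟨le_antisymm (not_lt.mp h1) (not_lt.mp h3), h2⟩
    · rintro (h | ⟨h1, h2⟩)
      · exact Or.inl h
      · exact Or.inr ⟨by rw [h1]; exact lt_irrefl _, h2⟩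
  rw [hbefore]

-- ===== VERDICT =====
theorem result_spec : Claim_equal_result := by
  unfold Claim_equal_result
  intro arr _
  unfold Spec_result
  -- A's value
  have hA : result arr
      = maxK ((PySem.List.sorted arr K).filter (goodB arr)) := by
    have hred : result arr = resultLoop (PySem.List.sorted arr K) (PySem.Set.ofList arr)
        (PySem.List.pyRange (((PySem.List.sorted arr K).length : Int) - 1) (-1) (-1)) := by
      unfold result
      rw [sorted2_eq_sortedK]
    rw [hred]
    have hrange : PySem.List.pyRange (((PySem.List.sorted arr K).length : Int) - 1) (-1) (-1)
        = ((List.range (PySem.List.sorted arr K).length).map (fun k : Nat => (k : Int))).reverse := by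
      rw [PySem.List.pyRange_neg_one_eq_reverse]
      norm_num
      rw [PySem.List.pyRange_zero_natCast]
    rw [hrange, loop_eq_findRev]
    have hflag : resultFlag (PySem.Set.ofList arr) = goodB arr :=
      funext (flag_eq_goodB arr)
    rw [hflag]
    exact findRev_eq_maxK (goodB arr) _ (PySem.List.sorted_pairwise arr K)
  -- B's value
  have hB : result_alt arr
      = maxK ((PySem.List.sorted arr (fun w => PySem.Str.len w)).filter (goodB arr)) := by
    unfold result_alt
    have := foldB arr (PySem.List.sorted arr (fun w => PySem.Str.len w)) []
      (by simpa using PySem.List.sorted_pairwise arr (fun w => PySem.Str.len w))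
      (by intro x hx
          rw [List.nil_append] at hx
          exact (PySem.List.mem_sorted _ _ _ _).mp hx)
      (by intro x hx
          rw [List.nil_append]
          exact (PySem.List.mem_sorted _ _ false x).mpr hx)
    simp only [List.nil_append] at this
    rw [show (PySem.Set.empty : PySem.Set String) = PySem.Set.ofList (List.filter (goodB arr) [])
        from rfl, show ("" : String) = maxK (List.filter (goodB arr) []) from rfl]
    rw [this]
  rw [hA, hB]
  exact maxK_perm (List.Perm.filter _
    ((PySem.List.sorted_perm arr K false).trans
      (PySem.List.sorted_perm arr (fun w => PySem.Str.len w) false).symm))
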